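-- pv_equiv track=rewrite | github.com/KevinEspinozaV/Respaldo | Pre-processing/postprocessing.py | calculoData
-- ===== SOURCE A (Python) =====
-- def calculoData(list_iter):
--     list_data_aux = []
--     for iter in list_iter:
--         lista_aux_train = []
--         lista_aux_test = []
--         for iteraux in iter:
--             lista_aux_train.append(iteraux[0])
--             lista_aux_test.append(iteraux[1])
--         list_data_aux.append([lista_aux_train, lista_aux_test])
--
--     i = 0
--     lista_data = []
--     while i < len(list_data_aux): # Se recorre todas las iter
--         lista_train_aux = []
--         for lista in list_data_aux[i][0]:
--             lista_train_aux.extend(lista)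
--         lista_test_aux = []
--         for lista in list_data_aux[i][1]:
--             lista_test_aux.extend(lista)
--         lista_data.append([lista_train_aux,lista_test_aux])
--         i = i + 1
--
--     return lista_data
-- ===== SOURCE B (Python) =====
-- def calculoData(list_iter):
--     lista_data = []
--     for iter in list_iter:
--         train = []
--         test = []
--         for iteraux in iter:
--             train.extend(iteraux[0])
--             test.extend(iteraux[1])
--         lista_data.append([train, test])
--     return lista_data
-- ===== Notes on version B (the rewrite author's own statement) =====
-- stated objective: simpler
-- what changed: B fuses A's two shaped passes into one: instead of first building an intermediate [train_lists, test_lists] structure and then re-scanning it to flatten each side, B extends flat train/test accumulators directly in a single inner loop per iteration.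
import Mathlib
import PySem

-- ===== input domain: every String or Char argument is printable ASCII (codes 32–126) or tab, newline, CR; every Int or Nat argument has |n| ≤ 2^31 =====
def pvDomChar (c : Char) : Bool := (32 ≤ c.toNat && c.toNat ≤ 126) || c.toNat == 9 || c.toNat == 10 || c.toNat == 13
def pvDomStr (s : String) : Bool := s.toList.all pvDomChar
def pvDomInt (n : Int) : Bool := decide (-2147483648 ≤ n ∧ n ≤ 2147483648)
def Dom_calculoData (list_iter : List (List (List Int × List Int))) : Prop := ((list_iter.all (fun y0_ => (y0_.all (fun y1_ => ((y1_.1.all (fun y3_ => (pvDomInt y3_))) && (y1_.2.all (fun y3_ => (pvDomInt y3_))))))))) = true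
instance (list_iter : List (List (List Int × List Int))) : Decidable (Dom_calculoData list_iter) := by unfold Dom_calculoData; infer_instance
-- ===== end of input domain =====

-- B fuses A's two passes (build [train_lists, test_lists] then flatten each side) into one loop extending flat accumulators; objective: simpler.


-- ===== PORT A =====
-- first loop: build list_data_aux; the Python 2-element list [lista_aux_train, lista_aux_test] is a pair here
def calculoData (list_iter : List (List (List Int × List Int))) : List (List (List Int)) :=
  let list_data_aux : List (List (List Int) × List (List Int)) :=
    list_iter.foldl (fun acc iter =>
      let p := iter.foldl
        (fun (p : List (List Int) × List (List Int)) iteraux =>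
          (p.1 ++ [iteraux.1], p.2 ++ [iteraux.2])) ([], [])
      acc ++ [(p.1, p.2)]) []
  -- while loop over i = 0 .. len-1, visiting list_data_aux in order
  list_data_aux.foldl (fun lista_data pr =>
    let lista_train_aux := pr.1.foldl (fun acc lista => acc ++ lista) []
    let lista_test_aux := pr.2.foldl (fun acc lista => acc ++ lista) []
    lista_data ++ [[lista_train_aux, lista_test_aux]]) []

-- ===== PORT B =====
def calculoData_alt (list_iter : List (List (List Int × List Int))) : List (List (List Int)) :=
  list_iter.foldl (fun lista_data iter =>
    let p := iter.foldl
      (fun (p : List Int × List Int) iteraux =>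
        (p.1 ++ iteraux.1, p.2 ++ iteraux.2)) ([], [])
    lista_data ++ [[p.1, p.2]]) []

-- ===== PRECONDITION & SPEC =====
def Spec_calculoData (list_iter : List (List (List Int × List Int))) (out : List (List (List Int))) : Prop := out = calculoData_alt list_iter
instance (list_iter : List (List (List Int × List Int))) (out : List (List (List Int))) : Decidable (Spec_calculoData list_iter out) := by unfold Spec_calculoData; infer_instance

-- ===== CLAIM (what is proved, stated in full; the proofs are below) =====
def Claim_equal_calculoData : Prop := ∀ (list_iter : List (List (List Int × List Int))), Dom_calculoData list_iter → Spec_calculoData list_iter (calculoData list_iter)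

-- ===== LEMMAS AND PROOFS =====

-- residual shape left by simp in the three accumulator inductions below
lemma flatten_map_singleton' {α β : Type} (t : List α) (f : α → β) :
    (t.map (fun x => [f x])).flatten = t.map f := by
  induction t with
  | nil => rfl
  | cons h t ih => simp [ih]

-- A's inner first-phase fold collects the two projections
lemma phase1_eq (iter : List (List Int × List Int)) (a b : List (List Int)) :
    iter.foldl (fun (p : List (List Int) × List (List Int)) iteraux =>
      (p.1 ++ [iteraux.1], p.2 ++ [iteraux.2])) (a, b)
      = (a ++ iter.map Prod.fst, b ++ iter.map Prod.snd) := by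
  induction iter generalizing a b with
  | nil => simp
  | cons h t ih => simp [List.foldl_cons, ih]

-- flattening fold
lemma flat_eq (l : List (List Int)) (a : List Int) :
    l.foldl (fun acc lista => acc ++ lista) a = a ++ l.flatten := by
  induction l generalizing a with
  | nil => simp
  | cons h t ih => simp [List.foldl_cons, ih]

-- B's fused inner fold
lemma fused_eq (iter : List (List Int × List Int)) (a b : List Int) :
    iter.foldl (fun (p : List Int × List Int) iteraux =>
      (p.1 ++ iteraux.1, p.2 ++ iteraux.2)) (a, b)
      = (a ++ (iter.map Prod.fst).flatten, b ++ (iter.map Prod.snd).flatten) := by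
  induction iter generalizing a b with
  | nil => simp
  | cons h t ih => simp [List.foldl_cons, ih]

lemma both_eq (list_iter : List (List (List Int × List Int))) (acc : List (List (List Int))) :
    ((list_iter.foldl (fun acc iter =>
        let p := iter.foldl
          (fun (p : List (List Int) × List (List Int)) iteraux =>
            (p.1 ++ [iteraux.1], p.2 ++ [iteraux.2])) ([], [])
        acc ++ [(p.1, p.2)]) ([] : List (List (List Int) × List (List Int)))).foldl
      (fun lista_data pr =>
        lista_data ++ [[pr.1.foldl (fun acc lista => acc ++ lista) [],
                        pr.2.foldl (fun acc lista => acc ++ lista) []]]) acc)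
    = list_iter.foldl (fun lista_data iter =>
        let p := iter.foldl
          (fun (p : List Int × List Int) iteraux =>
            (p.1 ++ iteraux.1, p.2 ++ iteraux.2)) ([], [])
        lista_data ++ [[p.1, p.2]]) acc := by
  have key : ∀ (li : List (List (List Int × List Int))) (acc : List (List (List Int))),
      li.foldl (fun lista_data iter =>
        let p := iter.foldl
          (fun (p : List Int × List Int) iteraux =>
            (p.1 ++ iteraux.1, p.2 ++ iteraux.2)) ([], [])
        lista_data ++ [[p.1, p.2]]) acc
      = acc ++ li.map (fun iter => [(iter.map Prod.fst).flatten, (iter.map Prod.snd).flatten]) := by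
    intro li
    induction li with
    | nil => simp
    | cons h t _ => intro acc; simp [List.foldl_cons, fused_eq, flatten_map_singleton']
  have key1 : ∀ (li : List (List (List Int × List Int))) (acc : List (List (List Int) × List (List Int))),
      li.foldl (fun acc iter =>
        let p := iter.foldl
          (fun (p : List (List Int) × List (List Int)) iteraux =>
            (p.1 ++ [iteraux.1], p.2 ++ [iteraux.2])) ([], [])
        acc ++ [(p.1, p.2)]) acc
      = acc ++ li.map (fun iter => (iter.map Prod.fst, iter.map Prod.snd)) := by
    intro li
    induction li with
    | nil => simp
    | cons h t _ => intro acc; simp [List.foldl_cons, phase1_eq, flatten_map_singleton']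
  have key2 : ∀ (l : List (List (List Int) × List (List Int))) (acc : List (List (List Int))),
      l.foldl (fun lista_data pr =>
        lista_data ++ [[pr.1.foldl (fun acc lista => acc ++ lista) [],
                        pr.2.foldl (fun acc lista => acc ++ lista) []]]) acc
      = acc ++ l.map (fun pr => [pr.1.flatten, pr.2.flatten]) := by
    intro l
    induction l with
    | nil => simp
    | cons h t _ => intro acc; simp [List.foldl_cons, flat_eq, flatten_map_singleton']
  rw [key, key1, key2]
  simp [List.map_map]

-- ===== VERDICT (by name: the statement is the Claim_ definition above) =====
theorem calculoData_spec : Claim_equal_calculoData := by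
  intro list_iter _
  show calculoData list_iter = calculoData_alt list_iter
  simpa [calculoData, calculoData_alt] using both_eq list_iter []
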